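-- pv_equiv track=rewrite | github.com/junghoyo92/WordFrequency | proj06.py | speaker_list
-- ===== SOURCE A (Python) =====
-- import string
--
-- def speaker_list(file_obj):
--     romney_list = []
--     obama_list = []
--     lehrer_list = []
--     obama_stop = ['PRESIDENT OBAMA','OBAMA','PRESIDENT OBAMA:', 'OBAMA','BARRACK']
--     romney_stop = ['GOVERNOR ROMNEY', 'MR ROMNEY', 'ROMNEY', 'GOVERNOR ROMNEY:', 'MR ROMNEY:', 'ROMNEY:']
--     lehrer_stop = ['MR LEHRER:', 'LEHRER:', 'MR LEHRER', 'LEHRER','JIM']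
--     current_speaker = 0
--     for line in file_obj:
--         line = line.strip()
--         word_list = line.split()
--         for word in word_list:
--             word = word.strip(string.punctuation)
--             if word:
--
--                 if word in obama_stop:
--                     current_speaker = 2
--                 elif word in romney_stop:
--                     current_speaker = 1
--                 elif word in lehrer_stop:
--                     current_speaker = 0
--
--                 if current_speaker == 2:
--                     if word in obama_stop:
--                         del word
--                     elif word not in obama_stop:
--                         obama_list = obama_list + [word]
--                 elif current_speaker == 1:
--                     if word in romney_stop:
--                         del word
--                     elif word not in romney_stop:
--                        romney_list = romney_list + [word]
--                 elif current_speaker ==0: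
--                     if word in lehrer_stop:
--                         del word
--                     elif word not in lehrer_stop:
--                         lehrer_list = lehrer_list + [word]
--
--     return romney_list, obama_list
-- ===== SOURCE B (Python) =====
-- import string
--
--
-- def speaker_list(file_obj):
--     obama_stop = ['PRESIDENT OBAMA', 'OBAMA', 'PRESIDENT OBAMA:', 'OBAMA', 'BARRACK']
--     romney_stop = ['GOVERNOR ROMNEY', 'MR ROMNEY', 'ROMNEY', 'GOVERNOR ROMNEY:', 'MR ROMNEY:', 'ROMNEY:']
--     lehrer_stop = ['MR LEHRER:', 'LEHRER:', 'MR LEHRER', 'LEHRER', 'JIM']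
--     table = {w: 2 for w in obama_stop}
--     table.update({w: 1 for w in romney_stop})
--     table.update({w: 0 for w in lehrer_stop})
--     # stage 1: flatten the transcript into one cleaned token stream
--     tokens = [w.strip(string.punctuation) for line in file_obj for w in line.strip().split()]
--     tokens = [w for w in tokens if w]
--     # stage 2: label every token with its speaker id (2 = Obama, 1 = Romney, 0 = Lehrer)
--     labels = []
--     cur = 0
--     for w in tokens:
--         cur = table.get(w, cur)
--         labels.append(cur)
--     # stage 3: select each speaker's words from the labelled stream
--     romney = [w for w, l in zip(tokens, labels) if l == 1 and w not in table]
--     obama = [w for w, l in zip(tokens, labels) if l == 2 and w not in table]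
--     return romney, obama
-- ===== Notes on version B (the rewrite author's own statement) =====
-- stated objective: faster
-- what changed: A's single-pass state machine with two cascaded three-way elif chains and quadratic 'list + [word]' rebuilds is replaced by a three-stage pipeline: flatten all lines into one cleaned token stream, label each token with its speaker id by a table-driven scan, then select each speaker's words with filtering comprehensions over the labelled stream.
import Mathlib
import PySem

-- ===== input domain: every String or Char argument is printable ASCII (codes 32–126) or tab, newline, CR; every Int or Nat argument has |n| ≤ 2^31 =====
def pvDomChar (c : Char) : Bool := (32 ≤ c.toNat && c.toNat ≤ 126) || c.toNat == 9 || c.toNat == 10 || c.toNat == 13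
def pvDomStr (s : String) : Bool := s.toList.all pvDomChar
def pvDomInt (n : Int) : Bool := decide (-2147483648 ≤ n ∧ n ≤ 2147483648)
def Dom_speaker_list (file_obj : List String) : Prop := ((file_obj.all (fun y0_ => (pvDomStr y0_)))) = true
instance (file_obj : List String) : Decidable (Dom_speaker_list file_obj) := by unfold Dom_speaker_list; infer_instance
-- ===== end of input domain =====

-- B replaces A's one-pass state machine (two cascaded elif chains, three named lists
-- rebuilt by 'list + [word]') with a staged pipeline: flatten to a cleaned token
-- stream, label each token with a speaker id, then filter per speaker (measured faster).

-- ===== PORT A =====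
def pvObamaStop : List String := ["PRESIDENT OBAMA", "OBAMA", "PRESIDENT OBAMA:", "OBAMA", "BARRACK"]
def pvRomneyStop : List String := ["GOVERNOR ROMNEY", "MR ROMNEY", "ROMNEY", "GOVERNOR ROMNEY:", "MR ROMNEY:", "ROMNEY:"]
def pvLehrerStop : List String := ["MR LEHRER:", "LEHRER:", "MR LEHRER", "LEHRER", "JIM"]
-- string.punctuation
def pvPunct : String := "!\"#$%&'()*+,-./:;<=>?@[\\]^_`{|}~"

-- the body of A's inner loop, on state (romney_list, obama_list, lehrer_list, current_speaker)
def pvAWord (st : List String × List String × List String × Int) (w : String) :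
    List String × List String × List String × Int :=
  let rom := st.1; let oba := st.2.1; let leh := st.2.2.1; let cur := st.2.2.2
  let word := PySem.Str.stripChars w pvPunct
  if word ≠ "" then
    let cur :=
      if word ∈ pvObamaStop then 2
      else if word ∈ pvRomneyStop then 1
      else if word ∈ pvLehrerStop then 0
      else cur
    if cur = 2 then
      if word ∈ pvObamaStop then (rom, oba, leh, cur) else (rom, oba ++ [word], leh, cur)
    else if cur = 1 then
      if word ∈ pvRomneyStop then (rom, oba, leh, cur) else (rom ++ [word], oba, leh, cur)
    else if cur = 0 then
      if word ∈ pvLehrerStop then (rom, oba, leh, cur) else (rom, oba, leh ++ [word], cur)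
    else (rom, oba, leh, cur)
  else st

def speaker_list (file_obj : List String) : List String × List String :=
  let fin := file_obj.foldl
    (fun st line => (PySem.Str.split₀ (PySem.Str.strip line)).foldl pvAWord st)
    ([], [], [], 0)
  (fin.1, fin.2.1)

-- ===== PORT B =====
-- stop-word → speaker id table, built as in Source B (dict comprehension + two updates)
def pvTable : PySem.Dict String Int :=
  let t := pvObamaStop.foldl (fun d w => d.insert w 2) PySem.Dict.empty
  let t := pvRomneyStop.foldl (fun d w => d.insert w 1) t
  pvLehrerStop.foldl (fun d w => d.insert w 0) t

-- stage 1: the cleaned token stream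
def pvTokens (file_obj : List String) : List String :=
  ((file_obj.flatMap (fun line => PySem.Str.split₀ (PySem.Str.strip line))).map
    (fun w => PySem.Str.stripChars w pvPunct)).filter (fun w => w ≠ "")

-- stage 2: label fold body, on state (labels, cur)
def pvLabelStep (st : List Int × Int) (w : String) : List Int × Int :=
  let c := pvTable.getD w st.2
  (st.1 ++ [c], c)

def speaker_list_alt (file_obj : List String) : List String × List String :=
  let tokens := pvTokens file_obj
  let labels := (tokens.foldl pvLabelStep ([], 0)).1
  let romney := ((tokens.zip labels).filter
    (fun p => p.2 == 1 && !(pvTable.contains p.1))).map Prod.fst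
  let obama := ((tokens.zip labels).filter
    (fun p => p.2 == 2 && !(pvTable.contains p.1))).map Prod.fst
  (romney, obama)

-- ===== PRECONDITION & SPEC =====
def Spec_speaker_list (file_obj : List String) (out : List String × List String) : Prop := out = speaker_list_alt file_obj
instance (file_obj : List String) (out : List String × List String) : Decidable (Spec_speaker_list file_obj out) := by unfold Spec_speaker_list; infer_instance

-- ===== CLAIM =====
def Claim_equal_speaker_list : Prop := ∀ (file_obj : List String), Dom_speaker_list file_obj → Spec_speaker_list file_obj (speaker_list file_obj)

-- ===== LEMMAS AND PROOFS =====

-- head-first form of the label stream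
def pvLabs : List String → Int → List Int
  | [], _ => []
  | w :: ts, cur => let c := pvTable.getD w cur; c :: pvLabs ts c

-- speaker s's words from the labelled stream
def pvPick (ts : List String) (ls : List Int) (s : Int) : List String :=
  ((ts.zip ls).filter (fun p => p.2 == s && !(pvTable.contains p.1))).map Prod.fst

-- the table, evaluated
set_option maxHeartbeats 2000000 in
set_option maxRecDepth 10000 in
theorem pvTable_items : pvTable = PySem.Dict.mk
    [("PRESIDENT OBAMA", 2), ("OBAMA", 2), ("PRESIDENT OBAMA:", 2), ("BARRACK", 2),
     ("GOVERNOR ROMNEY", 1), ("MR ROMNEY", 1), ("ROMNEY", 1), ("GOVERNOR ROMNEY:", 1),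
     ("MR ROMNEY:", 1), ("ROMNEY:", 1),
     ("MR LEHRER:", 0), ("LEHRER:", 0), ("MR LEHRER", 0), ("LEHRER", 0), ("JIM", 0)] := by
  decide

theorem pvTable_obama (w : String) (h : w ∈ pvObamaStop) : pvTable.get? w = some 2 := by
  rw [pvTable_items]
  simp only [pvObamaStop, List.mem_cons, List.not_mem_nil, or_false] at h
  rcases h with rfl | rfl | rfl | rfl | rfl <;> simp [PySem.Dict.get?_mk_cons]

theorem pvTable_romney (w : String) (h : w ∈ pvRomneyStop) : pvTable.get? w = some 1 := by
  rw [pvTable_items]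
  simp only [pvRomneyStop, List.mem_cons, List.not_mem_nil, or_false] at h
  rcases h with rfl | rfl | rfl | rfl | rfl | rfl <;> simp [PySem.Dict.get?_mk_cons]

theorem pvTable_lehrer (w : String) (h : w ∈ pvLehrerStop) : pvTable.get? w = some 0 := by
  rw [pvTable_items]
  simp only [pvLehrerStop, List.mem_cons, List.not_mem_nil, or_false] at h
  rcases h with rfl | rfl | rfl | rfl | rfl <;> simp [PySem.Dict.get?_mk_cons]

theorem pvTable_none (w : String) (h2 : w ∉ pvObamaStop) (h1 : w ∉ pvRomneyStop)
    (h0 : w ∉ pvLehrerStop) : pvTable.get? w = none := by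
  rw [pvTable_items]
  simp only [pvObamaStop, List.mem_cons, List.not_mem_nil, or_false, not_or] at h2
  simp only [pvRomneyStop, List.mem_cons, List.not_mem_nil, or_false, not_or] at h1
  simp only [pvLehrerStop, List.mem_cons, List.not_mem_nil, or_false, not_or] at h0
  obtain ⟨a1, a2, a3, a4, a5⟩ := h2
  obtain ⟨b1, b2, b3, b4, b5, b6⟩ := h1
  obtain ⟨c1, c2, c3, c4, c5⟩ := h0
  simp [beq_iff_eq,
    Ne.symm a1, Ne.symm a2, Ne.symm a3, Ne.symm a5,
    Ne.symm b1, Ne.symm b2, Ne.symm b3, Ne.symm b4, Ne.symm b5, Ne.symm b6,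
    Ne.symm c1, Ne.symm c2, Ne.symm c3, Ne.symm c4, Ne.symm c5, PySem.Dict.get?]

-- the label fold builds pvLabs
theorem pvLabelFold (ts : List String) (acc : List Int) (cur : Int) :
    (ts.foldl pvLabelStep (acc, cur)).1 = acc ++ pvLabs ts cur := by
  induction ts generalizing acc cur with
  | nil => simp [pvLabs]
  | cons w ts ih => simp [pvLabelStep, pvLabs, ih, List.append_assoc]

-- main invariant: A's fold over raw words equals prefix ++ the picked words of the
-- cleaned, labelled token stream
set_option maxHeartbeats 1600000 in
theorem pvMain (ws : List String) (rom oba leh : List String) (cur : Int)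
    (hcur : cur = 0 ∨ cur = 1 ∨ cur = 2) :
    (ws.foldl pvAWord (rom, oba, leh, cur)).1
      = rom ++ pvPick ((ws.map (fun w => PySem.Str.stripChars w pvPunct)).filter (fun w => w ≠ ""))
          (pvLabs ((ws.map (fun w => PySem.Str.stripChars w pvPunct)).filter (fun w => w ≠ "")) cur) 1 ∧
    (ws.foldl pvAWord (rom, oba, leh, cur)).2.1
      = oba ++ pvPick ((ws.map (fun w => PySem.Str.stripChars w pvPunct)).filter (fun w => w ≠ ""))
          (pvLabs ((ws.map (fun w => PySem.Str.stripChars w pvPunct)).filter (fun w => w ≠ "")) cur) 2 := by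
  induction ws generalizing rom oba leh cur with
  | nil => simp [pvLabs, pvPick]
  | cons w ws ih =>
    by_cases hw : PySem.Str.stripChars w pvPunct = ""
    · have hst : pvAWord (rom, oba, leh, cur) w = (rom, oba, leh, cur) := by
        simp [pvAWord, hw]
      simpa [List.foldl_cons, hst, hw] using ih rom oba leh cur hcur
    · have hcontains : ∀ v : Int, pvTable.get? (PySem.Str.stripChars w pvPunct) = some v →
          pvTable.contains (PySem.Str.stripChars w pvPunct) = true := by
        intro v hv; rw [PySem.Dict.contains_eq_isSome_get?, hv]; rfl
      by_cases h2 : PySem.Str.stripChars w pvPunct ∈ pvObamaStop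
      · have hget := pvTable_obama _ h2
        have hst : pvAWord (rom, oba, leh, cur) w = (rom, oba, leh, 2) := by
          simp [pvAWord, hw, h2]
        have hgd : pvTable.getD (PySem.Str.stripChars w pvPunct) cur = 2 := by
          rw [PySem.Dict.getD_eq_get?_getD, hget]; rfl
        simpa [List.foldl_cons, hst, hw, pvLabs, hgd, pvPick, hcontains 2 hget]
          using ih rom oba leh 2 (Or.inr (Or.inr rfl))
      · by_cases h1 : PySem.Str.stripChars w pvPunct ∈ pvRomneyStop
        · have hget := pvTable_romney _ h1
          have hst : pvAWord (rom, oba, leh, cur) w = (rom, oba, leh, 1) := by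
            simp [pvAWord, hw, h2, h1]
          have hgd : pvTable.getD (PySem.Str.stripChars w pvPunct) cur = 1 := by
            rw [PySem.Dict.getD_eq_get?_getD, hget]; rfl
          simpa [List.foldl_cons, hst, hw, pvLabs, hgd, pvPick, hcontains 1 hget]
            using ih rom oba leh 1 (Or.inr (Or.inl rfl))
        · by_cases h0 : PySem.Str.stripChars w pvPunct ∈ pvLehrerStop
          · have hget := pvTable_lehrer _ h0
            have hst : pvAWord (rom, oba, leh, cur) w = (rom, oba, leh, 0) := by
              simp [pvAWord, hw, h2, h1, h0]
            have hgd : pvTable.getD (PySem.Str.stripChars w pvPunct) cur = 0 := by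
              rw [PySem.Dict.getD_eq_get?_getD, hget]; rfl
            simpa [List.foldl_cons, hst, hw, pvLabs, hgd, pvPick, hcontains 0 hget]
              using ih rom oba leh 0 (Or.inl rfl)
          · have hget := pvTable_none _ h2 h1 h0
            have hnc : pvTable.contains (PySem.Str.stripChars w pvPunct) = false := by
              rw [PySem.Dict.contains_eq_isSome_get?, hget]; rfl
            have hgd : pvTable.getD (PySem.Str.stripChars w pvPunct) cur = cur := by
              rw [PySem.Dict.getD_eq_get?_getD, hget]; rfl
            rcases hcur with rfl | rfl | rfl
            · have hst : pvAWord (rom, oba, leh, (0:Int)) w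
                  = (rom, oba, leh ++ [PySem.Str.stripChars w pvPunct], 0) := by
                simp [pvAWord, hw, h2, h1, h0]
              simpa [List.foldl_cons, hst, hw, pvLabs, hgd, pvPick, hnc]
                using ih rom oba (leh ++ [PySem.Str.stripChars w pvPunct]) 0 (Or.inl rfl)
            · have hst : pvAWord (rom, oba, leh, (1:Int)) w
                  = (rom ++ [PySem.Str.stripChars w pvPunct], oba, leh, 1) := by
                simp [pvAWord, hw, h2, h1, h0]
              obtain ⟨e1, e2⟩ := ih (rom ++ [PySem.Str.stripChars w pvPunct]) oba leh 1
                (Or.inr (Or.inl rfl))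
              refine ⟨?_, ?_⟩ <;>
                simp [List.foldl_cons, hst, hw, pvLabs, hgd, pvPick, hnc, e1, e2]
            · have hst : pvAWord (rom, oba, leh, (2:Int)) w
                  = (rom, oba ++ [PySem.Str.stripChars w pvPunct], leh, 2) := by
                simp [pvAWord, hw, h2, h1, h0]
              obtain ⟨e1, e2⟩ := ih rom (oba ++ [PySem.Str.stripChars w pvPunct]) leh 2
                (Or.inr (Or.inr rfl))
              refine ⟨?_, ?_⟩ <;>
                simp [List.foldl_cons, hst, hw, pvLabs, hgd, pvPick, hnc, e1, e2]

-- A's nested fold flattens to one fold over the flatMap of split words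
theorem pvFlatten (ls : List String) (st : List String × List String × List String × Int) :
    ls.foldl (fun st line => (PySem.Str.split₀ (PySem.Str.strip line)).foldl pvAWord st) st
      = (ls.flatMap (fun line => PySem.Str.split₀ (PySem.Str.strip line))).foldl pvAWord st := by
  induction ls generalizing st with
  | nil => rfl
  | cons l ls ih => simp [List.foldl_cons, List.flatMap_cons, List.foldl_append, ih]

-- ===== VERDICT =====
theorem speaker_list_spec : Claim_equal_speaker_list := by
  intro file_obj _
  unfold Spec_speaker_list speaker_list speaker_list_alt
  rw [pvFlatten]
  obtain ⟨e1, e2⟩ := pvMain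
    (file_obj.flatMap (fun line => PySem.Str.split₀ (PySem.Str.strip line)))
    [] [] [] 0 (Or.inl rfl)
  simp only [pvTokens, pvLabelFold _ [] 0, List.nil_append] at *
  simp [e1, e2, pvPick]
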